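-- pv_equiv track=rewrite | github.com/aiguy110/advent-of-code-2020 | day_07/solution1.py | get_possible_parent_bags
-- ===== SOURCE A (Python) =====
-- def get_possible_parent_bags(bag_type, rules):
--     parent_bags = []
--     edge_bags = [bag_type]
--     while len(edge_bags) > 0:
--         starting_edge_bag_count = len(edge_bags)
--         for b in range(starting_edge_bag_count):
--             for rule_subject, requirements in rules:
--                 if edge_bags[b] in map(lambda r: r[1], requirements) and rule_subject not in parent_bags:
--                     parent_bags.append(rule_subject)
--                     edge_bags.append(rule_subject)
--
--         for b in range(starting_edge_bag_count-1, -1, -1):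
--             del edge_bags[b]
--
--     return parent_bags
-- ===== SOURCE B (Python) =====
-- def get_possible_parent_bags(bag_type, rules):
--     # Reverse adjacency: child bag -> list of rule subjects that contain it, in rule order.
--     contained_in = {}
--     for rule_subject, requirements in rules:
--         for child in dict.fromkeys(r[1] for r in requirements):
--             contained_in.setdefault(child, []).append(rule_subject)
--     parent_bags = []
--     seen = set()
--     frontier = [bag_type]
--     while frontier:
--         next_frontier = []
--         for bag in frontier:
--             for parent in contained_in.get(bag, []):
--                 if parent not in seen:
--                     seen.add(parent)
--                     parent_bags.append(parent)
--                     next_frontier.append(parent)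
--         frontier = next_frontier
--     return parent_bags
-- ===== Notes on version B (the rewrite author's own statement) =====
-- stated objective: alternative
-- what changed: Replaces A's repeated full scans of the rule list for every frontier bag (and linear membership tests on parent_bags) with a reverse adjacency dict child->parents built once plus a seen-set BFS over frontiers.
import Mathlib
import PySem

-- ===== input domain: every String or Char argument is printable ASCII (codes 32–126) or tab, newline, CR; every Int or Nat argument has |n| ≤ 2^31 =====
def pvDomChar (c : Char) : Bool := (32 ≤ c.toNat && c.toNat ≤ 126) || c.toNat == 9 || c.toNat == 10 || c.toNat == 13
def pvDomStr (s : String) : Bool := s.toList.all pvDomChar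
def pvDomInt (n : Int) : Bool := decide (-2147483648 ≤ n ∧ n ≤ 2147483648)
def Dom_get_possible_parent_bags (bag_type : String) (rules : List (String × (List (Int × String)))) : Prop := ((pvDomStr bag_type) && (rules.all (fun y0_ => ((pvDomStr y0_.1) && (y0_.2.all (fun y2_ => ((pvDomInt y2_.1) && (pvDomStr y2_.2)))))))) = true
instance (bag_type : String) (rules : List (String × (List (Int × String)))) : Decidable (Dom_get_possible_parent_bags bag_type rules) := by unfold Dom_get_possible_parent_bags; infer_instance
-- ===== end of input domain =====

-- B replaces A's per-frontier-bag rescans of the rule list (with list-membership tests on parent_bags)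
-- by a reverse-adjacency dict (child -> parents) built once plus a seen-set BFS; same return value.


-- ===== PORT A =====
-- one iteration of A's inner 'for rule_subject, requirements in rules' body, at edge index b
def paRuleStep (b : Int) (st : List String × List String) (r : String × (List (Int × String))) :
    List String × List String :=
  match PySem.List.pyGet? st.2 b with
  | some x => if x ∈ r.2.map Prod.snd ∧ r.1 ∉ st.1 then (st.1 ++ [r.1], st.2 ++ [r.1]) else st
  | none => st

-- one pass of A's while-loop body: the two index loops over range(starting_edge_bag_count)
def paRound (rules : List (String × (List (Int × String)))) (st : List String × List String) :
    List String × List String :=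
  let count : Int := st.2.length
  let st' := (PySem.List.pyRange 0 count 1).foldl (fun st b => rules.foldl (paRuleStep b) st) st
  let edges' := (PySem.List.pyRange (count - 1) (-1) (-1)).foldl
      (fun e b => match PySem.List.pop? e b with | some pr => pr.2 | none => e) st'.2
  (st'.1, edges')

-- reference characterisation of one round (used for the termination measure and the proofs)
def subjC (rules : List (String × (List (Int × String)))) (x : String) : List String :=
  rules.filterMap (fun r => if x ∈ r.2.map Prod.snd then some r.1 else none)

def newsF : List String → List String → List String
  | [], _ => []
  | s :: S, p => if s ∈ p then newsF S p else s :: newsF S (p ++ [s])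

def rnews (rules : List (String × (List (Int × String)))) : List String → List String → List String
  | [], _ => []
  | x :: fr, p => newsF (subjC rules x) p ++ rnews rules fr (p ++ newsF (subjC rules x) p)

theorem newsF_mem {S p : List String} {s : String} (h : s ∈ newsF S p) : s ∉ p ∧ s ∈ S := by
  induction S generalizing p with
  | nil => simp [newsF] at h
  | cons a S ih =>
    by_cases hap : a ∈ p
    · simp only [newsF, if_pos hap] at h
      exact ⟨(ih h).1, List.mem_cons_of_mem _ (ih h).2⟩
    · simp only [newsF, if_neg hap, List.mem_cons] at h
      rcases h with rfl | h
      · exact ⟨hap, List.mem_cons_self⟩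
      · exact ⟨fun hp => (ih h).1 (List.mem_append_left _ hp), List.mem_cons_of_mem _ (ih h).2⟩

theorem subjC_mem {rules : List (String × (List (Int × String)))} {x s : String}
    (h : s ∈ subjC rules x) : s ∈ rules.map Prod.fst := by
  simp only [subjC, List.mem_filterMap] at h
  rcases h with ⟨r, hr, he⟩
  split at he
  · cases he; exact List.mem_map_of_mem hr
  · cases he

theorem rnews_mem {rules : List (String × (List (Int × String)))} {fr p : List String} {s : String}
    (h : s ∈ rnews rules fr p) : s ∉ p ∧ s ∈ rules.map Prod.fst := by
  induction fr generalizing p with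
  | nil => simp [rnews] at h
  | cons x fr ih =>
    simp only [rnews, List.mem_append] at h
    rcases h with h | h
    · exact ⟨(newsF_mem h).1, subjC_mem (newsF_mem h).2⟩
    · rcases ih h with ⟨h1, h2⟩
      exact ⟨fun hp => h1 (List.mem_append_left _ hp), h2⟩

-- A's inner rules-loop at a fixed in-range index computes newsF of the subjects containing front[k]
theorem paRuleFold_eq (rules : List (String × (List (Int × String)))) (front : List String)
    (k : Nat) (hk : k < front.length) :
    ∀ (p e : List String),
      rules.foldl (paRuleStep (k : Int)) (p, front ++ e) =
        (p ++ newsF (subjC rules front[k]) p, front ++ (e ++ newsF (subjC rules front[k]) p)) := by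
  induction rules with
  | nil => intro p e; simp [subjC, newsF]
  | cons r rules ih =>
    intro p e
    have hget : PySem.List.pyGet? (front ++ e) (k : Int) = some front[k] := by
      rw [PySem.List.pyGet?_natCast, List.getElem?_append_left hk, List.getElem?_eq_getElem hk]
    simp only [List.foldl_cons, paRuleStep, hget]
    by_cases hch : front[k] ∈ r.2.map Prod.snd
    · by_cases hp : r.1 ∈ p
      · have hcond : ¬ (front[k] ∈ r.2.map Prod.snd ∧ r.1 ∉ p) := by tauto
        rw [if_neg hcond]
        rw [ih p e]
        simp [subjC, hch, newsF, hp]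
      · rw [if_pos ⟨hch, hp⟩]
        have : (p ++ [r.1], front ++ e ++ [r.1]) = (p ++ [r.1], front ++ (e ++ [r.1])) := by
          simp [List.append_assoc]
        rw [this, ih (p ++ [r.1]) (e ++ [r.1])]
        simp [subjC, hch, newsF, hp, List.append_assoc]
    · have hcond : ¬ (front[k] ∈ r.2.map Prod.snd ∧ r.1 ∉ p) := by tauto
      rw [if_neg hcond]
      rw [ih p e]
      simp [subjC, hch]

-- the range-indexed loop over the frontier equals rnews over the not-yet-processed suffix
theorem paIdxFold_eq (rules : List (String × (List (Int × String)))) (front : List String) :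
    ∀ (k : Nat), k ≤ front.length → ∀ (p e : List String),
      (PySem.List.pyRange (k : Int) (front.length : Int) 1).foldl
          (fun st b => rules.foldl (paRuleStep b) st) (p, front ++ e) =
        (p ++ rnews rules (front.drop k) p, front ++ (e ++ rnews rules (front.drop k) p)) := by
  have main : ∀ (n k : Nat), front.length - k = n → k ≤ front.length → ∀ (p e : List String),
      (PySem.List.pyRange (k : Int) (front.length : Int) 1).foldl
          (fun st b => rules.foldl (paRuleStep b) st) (p, front ++ e) =
        (p ++ rnews rules (front.drop k) p, front ++ (e ++ rnews rules (front.drop k) p)) := by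
    intro n
    induction n with
    | zero =>
      intro k hnk hk p e
      have hke : k = front.length := by omega
      subst hke
      rw [PySem.List.pyRange_one_eq_nil (le_refl _)]
      simp [List.drop_length, rnews]
    | succ n ihn =>
      intro k hnk hk p e
      have hklt : k < front.length := by omega
      rw [PySem.List.pyRange_one_cons (by exact_mod_cast hklt)]
      simp only [List.foldl_cons]
      rw [paRuleFold_eq rules front k hklt p e]
      have hcast : ((k : Int) + 1) = (((k + 1 : Nat)) : Int) := by push_cast; ring
      rw [hcast, ihn (k + 1) (by omega) (by omega)]
      rw [List.drop_eq_getElem_cons hklt]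
      simp [rnews, List.append_assoc]
  exact fun k hk p e => main (front.length - k) k rfl hk p e

-- the descending del-loop removes exactly the first front.length elements
theorem paDelFold_eq (front : List String) : ∀ (d : List String),
    (PySem.List.pyRange ((front.length : Int) - 1) (-1) (-1)).foldl
        (fun e b => match PySem.List.pop? e b with | some pr => pr.2 | none => e) (front ++ d) = d := by
  induction front using List.reverseRecOn with
  | nil =>
    intro d
    rw [PySem.List.pyRange_neg_one_eq_nil (by norm_num)]
    simp
  | append_singleton front' x ih =>
    intro d
    have hlen : ((front' ++ [x]).length : Int) - 1 = (front'.length : Int) := by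
      simp
    rw [hlen, PySem.List.pyRange_neg_one_cons (by omega)]
    simp only [List.foldl_cons]
    rw [PySem.List.pop?_natCast (front' ++ [x] ++ d) front'.length (by simp)]
    have herase : (front' ++ [x] ++ d).eraseIdx front'.length = front' ++ d := by
      rw [List.append_assoc, List.eraseIdx_append_of_length_le (le_refl _)]
      simp
    show List.foldl _ ((front' ++ [x] ++ d).eraseIdx front'.length) _ = d
    rw [herase]
    exact ih d

theorem paRound_eq (rules : List (String × (List (Int × String)))) (p front : List String) :
    paRound rules (p, front) = (p ++ rnews rules front p, rnews rules front p) := by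
  have h0 := paIdxFold_eq rules front 0 (Nat.zero_le _) p []
  simp only [Nat.cast_zero, List.drop_zero, List.nil_append, List.append_nil] at h0
  unfold paRound
  simp only [h0]
  exact congrArg (Prod.mk (p ++ rnews rules front p)) (paDelFold_eq front _)

theorem mu_lt (all p q : List String) (hpq : ∀ t ∈ p, t ∈ q) (s0 : String)
    (h1 : s0 ∈ all) (h2 : s0 ∉ p) (h3 : s0 ∈ q) :
    (all.filter fun s => !q.contains s).length < (all.filter fun s => !p.contains s).length := by
  have hmono : (all.filter fun s => !q.contains s).Sublist (all.filter fun s => !p.contains s) := by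
    apply List.monotone_filter_right
    intro a ha
    simp only [Bool.not_eq_eq_eq_not, Bool.not_true, List.contains_eq_mem, decide_eq_false_iff_not] at *
    exact fun hap => ha (hpq a hap)
  apply Nat.lt_of_le_of_ne hmono.length_le
  intro heq
  have hlists := hmono.eq_of_length heq
  have hs0 : s0 ∈ all.filter fun s => !p.contains s := by
    simp only [List.mem_filter, Bool.not_eq_eq_eq_not, Bool.not_true, List.contains_eq_mem,
      decide_eq_false_iff_not]
    exact ⟨h1, h2⟩
  rw [← hlists] at hs0
  simp only [List.mem_filter, Bool.not_eq_eq_eq_not, Bool.not_true, List.contains_eq_mem,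
    decide_eq_false_iff_not] at hs0
  exact hs0.2 h3

theorem mu_congr (all p q : List String) (h : ∀ t, t ∈ p ↔ t ∈ q) :
    (all.filter fun s => !p.contains s) = (all.filter fun s => !q.contains s) := by
  apply List.filter_congr
  intro t ht
  simp only [List.contains_eq_mem]
  by_cases htp : t ∈ p
  · simp [htp, (h t).mp htp]
  · have hq : t ∉ q := fun hq => htp ((h t).mpr hq)
    simp [htp, hq]

-- A's while-loop
def paLoop (rules : List (String × (List (Int × String)))) (parents edges : List String) :
    List String :=
  if h : edges.length > 0 then
    let st := paRound rules (parents, edges)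
    paLoop rules st.1 st.2
  else parents
termination_by ((((rules.map Prod.fst).filter fun s => !parents.contains s).length, edges.length) : Nat × Nat)
decreasing_by
  simp only [paRound_eq]
  by_cases hd : rnews rules edges parents = []
  · simp only [hd, List.append_nil]
    exact Prod.Lex.right _ (by simpa [hd] using h)
  · apply Prod.Lex.left
    rcases List.exists_mem_of_ne_nil _ hd with ⟨s0, hs0⟩
    exact mu_lt _ _ _ (fun t ht => List.mem_append_left _ ht) s0 (rnews_mem hs0).2
      (rnews_mem hs0).1 (List.mem_append_right _ hs0)

def get_possible_parent_bags (bag_type : String) (rules : List (String × (List (Int × String)))) :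
    List String :=
  paLoop rules [] [bag_type]

-- ===== PORT B =====
-- contained_in.setdefault(child, []).append(rule_subject), over the distinct children of one rule
def pbBuildStep (d : PySem.Dict String (List String)) (r : String × (List (Int × String))) :
    PySem.Dict String (List String) :=
  (PySem.Set.ofList (r.2.map Prod.snd)).foldl (fun d c => d.modify c [] (fun l => l ++ [r.1])) d

def pbBuild (rules : List (String × (List (Int × String)))) : PySem.Dict String (List String) :=
  rules.foldl pbBuildStep PySem.Dict.empty

-- body of 'for parent in contained_in.get(bag, [])'
def pbStep (st : List String × PySem.Set String × List String) (parent : String) :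
    List String × PySem.Set String × List String :=
  if PySem.Set.contains st.2.1 parent then st
  else (st.1 ++ [parent], PySem.Set.add st.2.1 parent, st.2.2 ++ [parent])

theorem getD_mem_vf_aux : ∀ (l : List (String × List String)) (k s : String),
    s ∈ (PySem.Dict.mk l).getD k [] → s ∈ (PySem.Dict.mk l).values.flatten := by
  intro l
  induction l with
  | nil =>
    intro k s hs
    simp [PySem.Dict.getD_eq_get?_getD, PySem.Dict.get?] at hs
  | cons hd tl ih =>
    intro k s hs
    rw [PySem.Dict.getD_eq_get?_getD, PySem.Dict.get?_mk_cons] at hs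
    rw [PySem.Dict.values_mk]
    by_cases hk : (hd.1 == k) = true
    · rw [if_pos hk] at hs
      simp only [Option.getD_some] at hs
      exact List.mem_flatten.mpr ⟨hd.2, by simp, hs⟩
    · rw [if_neg hk] at hs
      have := ih k s (by rwa [PySem.Dict.getD_eq_get?_getD])
      rw [PySem.Dict.values_mk] at this
      simp only [List.map_cons, List.flatten_cons, List.mem_append]
      exact Or.inr this

theorem getD_mem_values_flatten (rev : PySem.Dict String (List String)) (k s : String)
    (hs : s ∈ rev.getD k []) : s ∈ rev.values.flatten := by
  obtain ⟨l⟩ := rev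
  exact getD_mem_vf_aux l k s hs

theorem pbStepFold_gen (S : List String) :
    ∀ (ord : List String) (seen : PySem.Set String) (acc : List String),
      ∃ d seen', S.foldl pbStep (ord, seen, acc) = (ord ++ d, seen', acc ++ d) ∧
        (∀ t, t ∈ seen' ↔ t ∈ seen ∨ t ∈ d) ∧ (∀ s ∈ d, s ∉ seen ∧ s ∈ S) := by
  induction S with
  | nil => exact fun ord seen acc => ⟨[], seen, by simp, by simp, by simp⟩
  | cons a S ih =>
    intro ord seen acc
    by_cases ha : PySem.Set.contains seen a = true
    · obtain ⟨d, seen', heq, hiff, hmem⟩ := ih ord seen acc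
      refine ⟨d, seen', ?_, hiff, fun s hs => ⟨(hmem s hs).1, List.mem_cons_of_mem _ (hmem s hs).2⟩⟩
      have hstep : pbStep (ord, seen, acc) a = (ord, seen, acc) := by
        simp [pbStep, (PySem.Set.contains_iff seen a).mp ha]
      rw [List.foldl_cons, hstep, heq]
    · have hna : a ∉ seen := by
        rw [← PySem.Set.contains_iff]
        simpa using ha
      obtain ⟨d, seen', heq, hiff, hmem⟩ := ih (ord ++ [a]) (PySem.Set.add seen a) (acc ++ [a])
      have hstep : pbStep (ord, seen, acc) a = (ord ++ [a], PySem.Set.add seen a, acc ++ [a]) := by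
        simp [pbStep, ha, hna]
      refine ⟨a :: d, seen', ?_, ?_, ?_⟩
      · rw [List.foldl_cons, hstep, heq]
        simp [List.append_assoc]
      · intro t
        rw [hiff t, PySem.Set.mem_add]
        simp only [List.mem_cons]
        tauto
      · intro s hs
        rcases List.mem_cons.mp hs with rfl | hsd
        · exact ⟨hna, List.mem_cons_self⟩
        · exact ⟨fun hss => (hmem s hsd).1 ((PySem.Set.mem_add seen a s).mpr (Or.inl hss)),
            List.mem_cons_of_mem _ (hmem s hsd).2⟩

-- one pass of B's while-loop body ('for bag in frontier: for parent in contained_in.get(bag, [])')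
def pbRound (rev : PySem.Dict String (List String)) (order : List String)
    (seen : PySem.Set String) (frontier : List String) :
    List String × PySem.Set String × List String :=
  frontier.foldl (fun st bag => (rev.getD bag []).foldl pbStep st) (order, seen, ([] : List String))

theorem pbFrontFold_gen (rev : PySem.Dict String (List String)) (frontier : List String) :
    ∀ (ord : List String) (seen : PySem.Set String) (acc : List String),
      ∃ d seen',
        frontier.foldl (fun st bag => (rev.getD bag []).foldl pbStep st) (ord, seen, acc) =
          (ord ++ d, seen', acc ++ d) ∧
        (∀ t, t ∈ seen' ↔ t ∈ seen ∨ t ∈ d) ∧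
        (∀ s ∈ d, s ∉ seen ∧ s ∈ rev.values.flatten) := by
  induction frontier with
  | nil => exact fun ord seen acc => ⟨[], seen, by simp, by simp, by simp⟩
  | cons x fr ih =>
    intro ord seen acc
    obtain ⟨d1, seen1, heq1, hiff1, hmem1⟩ := pbStepFold_gen (rev.getD x []) ord seen acc
    obtain ⟨d2, seen2, heq2, hiff2, hmem2⟩ := ih (ord ++ d1) seen1 (acc ++ d1)
    refine ⟨d1 ++ d2, seen2, ?_, ?_, ?_⟩
    · rw [List.foldl_cons, heq1, heq2]
      simp [List.append_assoc]
    · intro t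
      rw [hiff2 t, hiff1 t]
      simp only [List.mem_append]
      tauto
    · intro s hs
      rcases List.mem_append.mp hs with hsd | hsd
      · exact ⟨(hmem1 s hsd).1, getD_mem_values_flatten _ _ _ (hmem1 s hsd).2⟩
      · exact ⟨fun hss => (hmem2 s hsd).1 ((hiff1 s).mpr (Or.inl hss)), (hmem2 s hsd).2⟩

theorem pbRound_gen (rev : PySem.Dict String (List String)) (frontier : List String) :
    ∀ (ord : List String) (seen : PySem.Set String),
      ∃ d seen',
        pbRound rev ord seen frontier = (ord ++ d, seen', d) ∧
        (∀ t, t ∈ seen' ↔ t ∈ seen ∨ t ∈ d) ∧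
        (∀ s ∈ d, s ∉ seen ∧ s ∈ rev.values.flatten) := by
  intro ord seen
  obtain ⟨d, seen', heq, hiff, hmem⟩ := pbFrontFold_gen rev frontier ord seen []
  exact ⟨d, seen', by simpa [pbRound] using heq, hiff, hmem⟩

-- B's while-loop
def pbLoop (rev : PySem.Dict String (List String)) (order : List String)
    (seen : PySem.Set String) (frontier : List String) : List String :=
  if h : frontier.length > 0 then
    let st := pbRound rev order seen frontier
    pbLoop rev st.1 st.2.1 st.2.2
  else order
termination_by (((rev.values.flatten.filter fun s => !seen.contains s).length, frontier.length) : Nat × Nat)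
decreasing_by
  rcases pbRound_gen rev frontier order seen with ⟨d, seen', heq, hiff, hmem⟩
  simp only [heq]
  by_cases hd : d = []
  · subst hd
    have : (rev.values.flatten.filter fun s => !seen'.contains s)
        = (rev.values.flatten.filter fun s => !seen.contains s) :=
      mu_congr _ _ _ (fun t => by simpa using (hiff t))
    simp only [this]
    exact Prod.Lex.right _ h
  · apply Prod.Lex.left
    rcases List.exists_mem_of_ne_nil _ hd with ⟨s0, hs0⟩
    exact mu_lt _ _ _ (fun t ht => (hiff t).2 (Or.inl ht)) s0 (hmem s0 hs0).2
      (hmem s0 hs0).1 ((hiff s0).2 (Or.inr hs0))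
def get_possible_parent_bags_alt (bag_type : String)
    (rules : List (String × (List (Int × String)))) : List String :=
  pbLoop (pbBuild rules) [] PySem.Set.empty [bag_type]

-- ===== PRECONDITION & SPEC =====
def Spec_get_possible_parent_bags (bag_type : String) (rules : List (String × (List (Int × String)))) (out : List String) : Prop := out = get_possible_parent_bags_alt bag_type rules
instance (bag_type : String) (rules : List (String × (List (Int × String)))) (out : List String) : Decidable (Spec_get_possible_parent_bags bag_type rules out) := by unfold Spec_get_possible_parent_bags; infer_instance

-- ===== CLAIM (what is proved, stated in full; the proofs are below) =====
def Claim_equal_get_possible_parent_bags : Prop := ∀ (bag_type : String) (rules : List (String × (List (Int × String)))), Dom_get_possible_parent_bags bag_type rules → Spec_get_possible_parent_bags bag_type rules (get_possible_parent_bags bag_type rules)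

-- ===== LEMMAS AND PROOFS =====
theorem modifyFold_getD (sbj : String) : ∀ (cs : List String), cs.Nodup →
    ∀ (d : PySem.Dict String (List String)) (x : String),
      (cs.foldl (fun d c => d.modify c [] (fun l => l ++ [sbj])) d).getD x [] =
        d.getD x [] ++ (if x ∈ cs then [sbj] else []) := by
  intro cs
  induction cs with
  | nil => intro _ d x; simp
  | cons c cs ih =>
    intro hnd d x
    rw [List.foldl_cons, ih (List.nodup_cons.mp hnd).2, PySem.Dict.getD_modify]
    by_cases hxc : x = c
    · subst hxc
      have hxcs : x ∉ cs := (List.nodup_cons.mp hnd).1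
      simp [hxcs]
    · simp only [if_neg hxc, List.mem_cons]
      by_cases hxcs : x ∈ cs
      · simp [hxcs]
      · simp [hxcs, hxc]

theorem buildRev_getD_aux (rules : List (String × (List (Int × String)))) :
    ∀ (d : PySem.Dict String (List String)) (x : String),
      (rules.foldl pbBuildStep d).getD x [] = d.getD x [] ++ subjC rules x := by
  induction rules with
  | nil => intro d x; simp [subjC]
  | cons r rules ih =>
    intro d x
    rw [List.foldl_cons, ih, pbBuildStep.eq_def,
      modifyFold_getD r.1 _ (PySem.Set.nodup_ofList _) d x]
    have hmem : (x ∈ PySem.Set.ofList (r.2.map Prod.snd)) ↔ x ∈ r.2.map Prod.snd :=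
      PySem.Set.mem_ofList _ _
    by_cases hch : x ∈ r.2.map Prod.snd
    · simp [subjC, List.filterMap_cons, hch, hmem.mpr hch, List.append_assoc]
    · simp [subjC, List.filterMap_cons, hch, fun h => hch (hmem.mp h)]

theorem buildRev_getD (rules : List (String × (List (Int × String)))) (x : String) :
    (pbBuild rules).getD x [] = subjC rules x := by
  rw [pbBuild, buildRev_getD_aux]
  simp

theorem pbStepFold_seen (S : List String) :
    ∀ (p : List String) (seen : PySem.Set String) (acc : List String),
      (∀ t, t ∈ seen ↔ t ∈ p) →
      ∃ seen', S.foldl pbStep (p, seen, acc) = (p ++ newsF S p, seen', acc ++ newsF S p) ∧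
        (∀ t, t ∈ seen' ↔ t ∈ p ++ newsF S p) := by
  induction S with
  | nil =>
    intro p seen acc hs
    exact ⟨seen, by simp [newsF], fun t => by simpa [newsF] using hs t⟩
  | cons a S ih =>
    intro p seen acc hs
    by_cases hap : a ∈ p
    · have hstep : pbStep (p, seen, acc) a = (p, seen, acc) := by
        simp [pbStep, (hs a).mpr hap]
      obtain ⟨seen', heq, hiff⟩ := ih p seen acc hs
      refine ⟨seen', ?_, ?_⟩
      · rw [List.foldl_cons, hstep, heq]
        simp [newsF, hap]
      · intro t
        rw [hiff t]
        simp [newsF, hap]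
    · have hna : a ∉ seen := fun hmem => hap ((hs a).mp hmem)
      have hstep : pbStep (p, seen, acc) a = (p ++ [a], PySem.Set.add seen a, acc ++ [a]) := by
        simp [pbStep, hna]
      have hs' : ∀ t, t ∈ PySem.Set.add seen a ↔ t ∈ p ++ [a] := by
        intro t
        rw [PySem.Set.mem_add]
        simp [hs t]
      obtain ⟨seen', heq, hiff⟩ := ih (p ++ [a]) (PySem.Set.add seen a) (acc ++ [a]) hs'
      refine ⟨seen', ?_, ?_⟩
      · rw [List.foldl_cons, hstep, heq]
        simp [newsF, hap, List.append_assoc]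
      · intro t
        rw [hiff t]
        simp [newsF, hap, List.append_assoc]

theorem pbRound_eq (rules : List (String × (List (Int × String)))) (frontier : List String) :
    ∀ (p : List String) (seen : PySem.Set String) (acc : List String),
      (∀ t, t ∈ seen ↔ t ∈ p) →
      ∃ seen',
        frontier.foldl (fun st bag => ((pbBuild rules).getD bag []).foldl pbStep st) (p, seen, acc) =
          (p ++ rnews rules frontier p, seen', acc ++ rnews rules frontier p) ∧
        (∀ t, t ∈ seen' ↔ t ∈ p ++ rnews rules frontier p) := by
  induction frontier with
  | nil =>
    intro p seen acc hs
    exact ⟨seen, by simp [rnews], fun t => by simpa [rnews] using hs t⟩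
  | cons x fr ih =>
    intro p seen acc hs
    obtain ⟨seen1, heq1, hiff1⟩ := pbStepFold_seen ((pbBuild rules).getD x []) p seen acc hs
    rw [buildRev_getD rules x] at heq1 hiff1
    obtain ⟨seen2, heq2, hiff2⟩ :=
      ih (p ++ newsF (subjC rules x) p) seen1 (acc ++ newsF (subjC rules x) p) hiff1
    refine ⟨seen2, ?_, ?_⟩
    · rw [List.foldl_cons, buildRev_getD rules x, heq1, heq2]
      simp [rnews, List.append_assoc]
    · intro t
      rw [hiff2 t]
      simp [rnews, List.append_assoc]

theorem loops_eq (rules : List (String × (List (Int × String)))) (parents edges : List String) :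
    ∀ (seen : PySem.Set String), (∀ t, t ∈ seen ↔ t ∈ parents) →
      pbLoop (pbBuild rules) parents seen edges = paLoop rules parents edges := by
  induction parents, edges using paLoop.induct rules with
  | case1 parents edges h st ih =>
    intro seen hs
    rw [pbLoop, paLoop]
    rw [dif_pos h, dif_pos h]
    obtain ⟨seen2, heq2, hiff2⟩ := pbRound_eq rules edges parents seen [] hs
    have hround : pbRound (pbBuild rules) parents seen edges =
        (parents ++ rnews rules edges parents, seen2, rnews rules edges parents) := by
      rw [pbRound, heq2]
      simp
    simp only [hround, paRound_eq]
    have hst : st = paRound rules (parents, edges) := rfl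
    rw [hst, paRound_eq] at ih
    exact ih seen2 hiff2
  | case2 parents edges h =>
    intro seen _
    rw [pbLoop, paLoop]
    rw [dif_neg h, dif_neg h]

-- ===== VERDICT (by name: the statement is the Claim_ definition above) =====
theorem get_possible_parent_bags_spec : Claim_equal_get_possible_parent_bags := by
  intro bag_type rules _
  unfold Spec_get_possible_parent_bags get_possible_parent_bags get_possible_parent_bags_alt
  exact (loops_eq rules [] [bag_type] PySem.Set.empty (by simp [PySem.Set.empty])).symm
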